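-- pv_equiv track=rewrite | github.com/LuthienResearch/luthien-proxy | src/luthien_cli/src/luthien_cli/repo.py | _remove_build_blocks
-- ===== SOURCE A (Python) =====
-- def _remove_build_blocks(content: str) -> str:
--     """Remove build: blocks, keeping only lines at the same or lesser indent."""
--     lines = content.splitlines(keepends=True)
--     result: list[str] = []
--     skip_indent = -1
--     for line in lines:
--         stripped = line.lstrip()
--         indent = len(line) - len(stripped)
--         if skip_indent >= 0:
--             if indent > skip_indent:
--                 continue
--             skip_indent = -1
--         if stripped.startswith("build:"):
--             skip_indent = indent
--             continue
--         result.append(line)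
--     return "".join(result)
-- ===== SOURCE B (Python) =====
-- def _remove_build_blocks(content: str) -> str:
--     """Remove build: blocks via index-based nested consumption loops."""
--     lines = content.splitlines(keepends=True)
--     result = []
--     i = 0
--     n = len(lines)
--     while i < n:
--         line = lines[i]
--         stripped = line.lstrip()
--         indent = len(line) - len(stripped)
--         if stripped.startswith("build:"):
--             block_indent = indent
--             i += 1
--             # consume the block body; stop WITHOUT consuming the boundary line
--             while i < n:
--                 nxt = lines[i]
--                 if len(nxt) - len(nxt.lstrip()) > block_indent:
--                     i += 1
--                 else:
--                     break
--         else: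
--             result.append(line)
--             i += 1
--     return "".join(result)
-- ===== Notes on version B (the rewrite author's own statement) =====
-- stated objective: alternative
-- what changed: Replaces A's single pass with a skip_indent flag carried across iterations by an index-based outer while loop that, on a build: line, runs an inner while loop consuming the block body and stopping without consuming the boundary line.
import Mathlib
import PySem

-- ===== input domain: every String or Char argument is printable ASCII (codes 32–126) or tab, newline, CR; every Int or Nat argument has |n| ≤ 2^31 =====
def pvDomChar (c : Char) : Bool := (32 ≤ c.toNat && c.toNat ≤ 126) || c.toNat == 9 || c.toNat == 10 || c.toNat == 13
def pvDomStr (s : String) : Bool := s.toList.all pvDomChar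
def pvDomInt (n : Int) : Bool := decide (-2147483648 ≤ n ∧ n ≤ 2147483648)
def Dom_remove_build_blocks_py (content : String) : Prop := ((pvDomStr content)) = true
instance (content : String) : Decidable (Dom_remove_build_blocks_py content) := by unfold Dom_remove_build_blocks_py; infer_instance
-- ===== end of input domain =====

-- B replaces A's flag-based single pass (skip_indent state) by an index-based outer loop with an
-- inner block-consuming loop; same result, a different decomposition (objective: alternative).

-- str.splitlines(keepends=True), ported by hand (PySem has only the keepends=False form).
-- Exact on the stated domain, whose only line-break characters are '\n', '\r' and "\r\n".
def pvSplitKeep : List Char → List Char → List (List Char)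
  | [], acc => if acc = [] then [] else [acc.reverse]
  | '\r' :: '\n' :: rest, acc => (acc.reverse ++ ['\r', '\n']) :: pvSplitKeep rest []
  | '\r' :: rest, acc => (acc.reverse ++ ['\r']) :: pvSplitKeep rest []
  | '\n' :: rest, acc => (acc.reverse ++ ['\n']) :: pvSplitKeep rest []
  | c :: rest, acc => pvSplitKeep rest (c :: acc)

-- ===== PORT A =====
-- loop body of A; the `skip_indent = -1` reset is absorbed into the two later branches,
-- each of which writes the skip state explicitly.
def aStep (st : List (List Char) × Int) (line : List Char) : List (List Char) × Int :=
  let stripped := PySem.Chars.lstrip line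
  let indent : Int := (line.length : Int) - (stripped.length : Int)
  if st.2 ≥ 0 ∧ indent > st.2 then st
  else if PySem.Chars.startswith stripped "build:".toList then (st.1, indent)
  else (st.1 ++ [line], -1)

def remove_build_blocks_py (content : String) : String :=
  let lines := pvSplitKeep content.toList []
  String.ofList (PySem.Chars.join [] (List.foldl aStep ([], -1) lines).1)

-- ===== PORT B =====
-- inner `while` loop of B: consume lines of the block body, stop without consuming the boundary
def bSkip (blockIndent : Int) : List (List Char) → List (List Char)
  | [] => []
  | l :: rest =>
      if ((l.length : Int) - ((PySem.Chars.lstrip l).length : Int)) > blockIndent then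
        bSkip blockIndent rest
      else l :: rest

theorem bSkip_length_le (k : Int) (xs : List (List Char)) : (bSkip k xs).length ≤ xs.length := by
  induction xs with
  | nil => simp [bSkip]
  | cons l rest ih => simp only [bSkip]; split <;> simp; omega

-- outer `while i < n` loop of B, as recursion on the suffix of unconsumed lines
def bLoop : List (List Char) → List (List Char)
  | [] => []
  | line :: rest =>
      let stripped := PySem.Chars.lstrip line
      let indent : Int := (line.length : Int) - (stripped.length : Int)
      if PySem.Chars.startswith stripped "build:".toList then bLoop (bSkip indent rest)
      else line :: bLoop rest
termination_by l => l.length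
decreasing_by
  · exact Nat.lt_succ_of_le (bSkip_length_le _ _)
  · simp

def remove_build_blocks_py_alt (content : String) : String :=
  let lines := pvSplitKeep content.toList []
  String.ofList (PySem.Chars.join [] (bLoop lines))

-- ===== PRECONDITION & SPEC =====
def Spec_remove_build_blocks_py (content : String) (out : String) : Prop := out = remove_build_blocks_py_alt content
instance (content : String) (out : String) : Decidable (Spec_remove_build_blocks_py content out) := by unfold Spec_remove_build_blocks_py; infer_instance

-- ===== CLAIM (what is proved, stated in full; the proofs are below) =====
def Claim_equal_remove_build_blocks_py : Prop := ∀ (content : String), Dom_remove_build_blocks_py content → Spec_remove_build_blocks_py content (remove_build_blocks_py content)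

-- ===== LEMMAS AND PROOFS =====

-- while A is in skip mode (skip_indent = k ≥ 0), folding A's step is exactly B's inner loop
theorem foldl_aStep_skip (lines : List (List Char)) (res : List (List Char)) (k : Int) (hk : 0 ≤ k) :
    (List.foldl aStep (res, k) lines).1 = (List.foldl aStep (res, -1) (bSkip k lines)).1 := by
  induction lines with
  | nil => simp [bSkip]
  | cons l rest ih =>
      by_cases hi : ((l.length : Int) - ((PySem.Chars.lstrip l).length : Int)) > k
      · have h1 : aStep (res, k) l = (res, k) := by
          simp only [aStep]
          rw [if_pos ⟨hk, hi⟩]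
        rw [List.foldl_cons, h1, show bSkip k (l :: rest) = bSkip k rest from by
          simp only [bSkip]; rw [if_pos hi]]
        exact ih
      · have hbs : bSkip k (l :: rest) = l :: rest := by
          simp only [bSkip]; rw [if_neg hi]
        have hstep : aStep (res, k) l = aStep (res, -1) l := by
          simp only [aStep]
          have h2 : ¬((k : Int) ≥ 0 ∧ (l.length : Int) - ((PySem.Chars.lstrip l).length : Int) > k) :=
            fun h => hi h.2
          have h3 : ¬((-1 : Int) ≥ 0 ∧ (l.length : Int) - ((PySem.Chars.lstrip l).length : Int) > -1) := by
            omega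
          rw [if_neg h2, if_neg h3]
        rw [hbs, List.foldl_cons, List.foldl_cons, hstep]

theorem lstrip_len_le (l : List Char) : (PySem.Chars.lstrip l).length ≤ l.length := by
  simp [PySem.Chars.lstrip]
  exact List.length_dropWhile_le _ _

-- main invariant: A's fold out of skip mode produces res ++ B's output
theorem foldl_aStep_eq_bLoop (n : Nat) (lines : List (List Char)) (res : List (List Char))
    (hn : lines.length ≤ n) :
    (List.foldl aStep (res, -1) lines).1 = res ++ bLoop lines := by
  induction n generalizing lines res with
  | zero =>
      have : lines = [] := by cases lines <;> simp_all
      subst this; simp [bLoop]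
  | succ n ih =>
      cases lines with
      | nil => simp [bLoop]
      | cons l rest =>
          simp only [List.length_cons] at hn
          by_cases hb : PySem.Chars.startswith (PySem.Chars.lstrip l) "build:".toList
          · have h1 : aStep (res, -1) l =
                (res, ((l.length : Int) - ((PySem.Chars.lstrip l).length : Int))) := by
              simp only [aStep]
              rw [if_neg (by push Not; intro h; omega), if_pos hb]
            have hind : (0 : Int) ≤ (l.length : Int) - ((PySem.Chars.lstrip l).length : Int) := by
              have := lstrip_len_le l; omega
            rw [List.foldl_cons, h1, foldl_aStep_skip _ _ _ hind,
              ih _ _ (le_trans (bSkip_length_le _ _) (by omega))]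
            simp only [bLoop]
            rw [if_pos hb]
          · have h1 : aStep (res, -1) l = (res ++ [l], -1) := by
              simp only [aStep]
              rw [if_neg (by push Not; intro h; omega), if_neg hb]
            rw [List.foldl_cons, h1, ih _ _ (by omega)]
            simp only [bLoop]
            rw [if_neg hb]; simp

-- ===== VERDICT (by name: the statement is the Claim_ definition above) =====
theorem remove_build_blocks_py_spec : Claim_equal_remove_build_blocks_py := by
  intro content _
  unfold Spec_remove_build_blocks_py remove_build_blocks_py remove_build_blocks_py_alt
  simp only []
  rw [foldl_aStep_eq_bLoop (pvSplitKeep content.toList []).length _ [] le_rfl]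
  simp
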